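-- pv_equiv track=rewrite | github.com/yaminipilli/daily-coding-questions | problem34.py | get_palindrome
-- ===== SOURCE A (Python) =====
-- def is_palindrome(s):
--     return s[::-1] == s
--
-- def get_palindrome(s):
--
--     if is_palindrome(s):
--         return s
--
--     if s[0] == s[-1]:
--         return s[0] + get_palindrome(s[1:-1]) + s[-1]
--     else:
--         pal1 = s[0] + get_palindrome(s[1:]) + s[0]
--         pal2 = s[-1] + get_palindrome(s[:-1]) + s[-1]
--
--         if len(pal1) > len(pal2):
--             return pal2
--         elif len(pal1) < len(pal2):
--             return pal1
--
--         return pal1 if pal1 < pal2 else pal2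
-- ===== SOURCE B (Python) =====
-- def get_palindrome(s):
--     # Bottom-up DP over substring lengths; layer[L][i] = answer for s[i:i+L].
--     n = len(s)
--     prev2 = []
--     prev = [""] * (n + 1)          # layer for length 0
--     for L in range(1, n + 1):
--         cur = []
--         for i in range(n - L + 1):
--             j = i + L
--             sub = s[i:j]
--             if sub == sub[::-1]:
--                 cur.append(sub)
--             elif s[i] == s[j - 1]:
--                 cur.append(s[i] + prev2[i + 1] + s[j - 1])
--             else:
--                 pal1 = s[i] + prev[i + 1] + s[i]
--                 pal2 = s[j - 1] + prev[i] + s[j - 1]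
--                 if len(pal1) < len(pal2):
--                     cur.append(pal1)
--                 elif len(pal1) > len(pal2):
--                     cur.append(pal2)
--                 else:
--                     cur.append(min(pal1, pal2))
--         prev2, prev = prev, cur
--     return prev[0]
-- ===== Notes on version B (the rewrite author's own statement) =====
-- stated objective: faster
-- what changed: A's exponential branching recursion over substrings is replaced by a bottom-up dynamic program over substring lengths that keeps only two rolling layers, computing each (i,j) subproblem once.
import Mathlib
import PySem

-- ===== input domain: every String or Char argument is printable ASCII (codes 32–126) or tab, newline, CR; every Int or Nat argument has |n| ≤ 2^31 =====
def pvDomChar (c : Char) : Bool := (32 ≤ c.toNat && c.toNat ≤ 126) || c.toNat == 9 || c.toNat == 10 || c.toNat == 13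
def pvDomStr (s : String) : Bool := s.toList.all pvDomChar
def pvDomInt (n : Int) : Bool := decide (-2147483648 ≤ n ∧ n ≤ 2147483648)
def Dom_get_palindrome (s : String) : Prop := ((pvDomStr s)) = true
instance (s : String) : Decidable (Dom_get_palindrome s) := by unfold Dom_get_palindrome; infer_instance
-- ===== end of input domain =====

-- B replaces A's exponential branching recursion by a bottom-up dynamic program over
-- substring lengths (two rolling layers); the returned string is identical.

-- ===== PORT A =====
-- shared helper: Python's lexicographic '<' on strings, as code-point comparison on List Char (exact)
def lexLt : List Char → List Char → Bool
  | [], [] => false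
  | [], _ :: _ => true
  | _ :: _, [] => false
  | a :: as, b :: bs => if a < b then true else if b < a then false else lexLt as bs

-- literal transliteration of A's recursion on the character list of s
-- (the [] case is Python's palindrome early return: "" is a palindrome, so A returns it)
def pvA : List Char → List Char
  | [] => []                                          -- if is_palindrome(s): return s
  | c :: rest =>
    if (c :: rest).reverse = c :: rest then c :: rest -- if is_palindrome(s): return s
    else
      let last := (c :: rest).getLast (by simp)       -- s[-1]
      if c = last then
        c :: (pvA rest.dropLast ++ [last])            -- s[0] + get_palindrome(s[1:-1]) + s[-1]
      else
        let pal1 := c :: (pvA rest ++ [c])            -- s[0] + get_palindrome(s[1:]) + s[0]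
        let pal2 := last :: (pvA (c :: rest).dropLast ++ [last])  -- s[-1] + get_palindrome(s[:-1]) + s[-1]
        if pal1.length > pal2.length then pal2
        else if pal1.length < pal2.length then pal1
        else if lexLt pal1 pal2 then pal1 else pal2
  termination_by l => l.length
  decreasing_by all_goals (simp only [List.length_dropLast, List.length_cons]; omega)

def get_palindrome (s : String) : String := String.mk (pvA s.toList)

-- ===== PORT B =====
-- one DP cell: the body of B's inner loop (prev2 = layer L-2, prev = layer L-1)
def pvBcell (l : List Char) (prev2 prev : List (List Char)) (L i : Nat) : List Char :=
  let j := i + L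
  let sub := (l.drop i).take L                        -- s[i:j]
  if sub.reverse = sub then sub
  else
    let ci := l.getD i ' '                            -- s[i]   (index valid whenever used)
    let cj := l.getD (j - 1) ' '                      -- s[j-1]
    if ci = cj then ci :: ((prev2.getD (i + 1) []) ++ [cj])
    else
      let pal1 := ci :: ((prev.getD (i + 1) []) ++ [ci])
      let pal2 := cj :: ((prev.getD i []) ++ [cj])
      if pal1.length < pal2.length then pal1
      else if pal1.length > pal2.length then pal2
      else if lexLt pal2 pal1 then pal2 else pal1     -- min(pal1, pal2)

-- one outer-loop iteration: build layer L from the two previous layers, shift the window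
def pvBstep (l : List Char) (n : Nat) (st : List (List Char) × List (List Char)) (L : Nat) :
    List (List Char) × List (List Char) :=
  (st.2, (List.range (n - L + 1)).map (fun i => pvBcell l st.1 st.2 L i))

def pvB (l : List Char) : List Char :=
  let n := l.length
  let st := (List.range n).foldl (fun st Lm1 => pvBstep l n st (Lm1 + 1))
      (([] : List (List Char)), List.replicate (n + 1) ([] : List Char))
  st.2.getD 0 []

def get_palindrome_alt (s : String) : String := String.mk (pvB s.toList)

-- ===== PRECONDITION & SPEC =====
def Spec_get_palindrome (s : String) (out : String) : Prop := out = get_palindrome_alt s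
instance (s : String) (out : String) : Decidable (Spec_get_palindrome s out) := by unfold Spec_get_palindrome; infer_instance

-- ===== CLAIM (what is proved, stated in full; the proofs are below) =====
def Claim_equal_get_palindrome : Prop := ∀ (s : String), Dom_get_palindrome s → Spec_get_palindrome s (get_palindrome s)

-- ===== LEMMAS AND PROOFS =====

theorem lexLt_asymm : ∀ (a b : List Char), lexLt a b = true → lexLt b a = false
  | [], [], h => by simp [lexLt] at h
  | [], _ :: _, _ => by simp [lexLt]
  | _ :: _, [], h => by simp [lexLt] at h
  | a :: as, b :: bs, h => by
    by_cases hab : a < b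
    · simp [lexLt, hab, lt_asymm hab]
    · by_cases hba : b < a
      · simp [lexLt, hab, hba] at h
      · simp only [lexLt, if_neg hab, if_neg hba] at h
        simp only [lexLt, if_neg hba, if_neg hab]
        exact lexLt_asymm as bs h

theorem lexLt_eq_of_not : ∀ (a b : List Char), lexLt a b = false → lexLt b a = false → a = b
  | [], [], _, _ => rfl
  | [], _ :: _, h, _ => by simp [lexLt] at h
  | _ :: _, [], _, h => by simp [lexLt] at h
  | a :: as, b :: bs, h1, h2 => by
    by_cases hab : a < b
    · simp [lexLt, hab] at h1
    · by_cases hba : b < a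
      · simp [lexLt, hba] at h2
      · simp only [lexLt, if_neg hab, if_neg hba] at h1 h2
        have : a = b := le_antisymm (not_lt.mp hba) (not_lt.mp hab)
        rw [this, lexLt_eq_of_not as bs h1 h2]

-- the specification layer: entry i of layer L is A's answer on s[i:i+L]
def layer (l : List Char) (L : Nat) : List (List Char) :=
  (List.range (l.length - L + 1)).map (fun i => pvA ((l.drop i).take L))

theorem layer_getD (l : List Char) (L i : Nat) (h : i + L ≤ l.length) :
    (layer l L).getD i [] = pvA ((l.drop i).take L) := by
  have hi : i < l.length - L + 1 := by omega
  simp [layer, List.getD_eq_getElem?_getD, hi]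

theorem sub_len (l : List Char) (L i : Nat) (h : i + L ≤ l.length) :
    ((l.drop i).take L).length = L := by
  simp only [List.length_take, List.length_drop]
  omega

theorem sub_cons (l : List Char) (L i : Nat) (hL : 1 ≤ L) (h : i + L ≤ l.length) :
    (l.drop i).take L = l[i]'(by omega) :: (l.drop (i + 1)).take (L - 1) := by
  obtain ⟨L', rfl⟩ : ∃ L', L = L' + 1 := ⟨L - 1, by omega⟩
  rw [List.drop_eq_getElem_cons (show i < l.length by omega), List.take_succ_cons]
  simp

theorem sub_dropLast (l : List Char) (L i : Nat) (h : i + L ≤ l.length) :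
    ((l.drop i).take L).dropLast = (l.drop i).take (L - 1) := by
  rw [List.dropLast_eq_take, sub_len l L i h, List.take_take]
  congr 1
  omega

theorem not_palin_len (t : List Char) (h : ¬ t.reverse = t) : 2 ≤ t.length := by
  match t with
  | [] => simp at h
  | [_] => simp at h
  | _ :: _ :: _ => simp only [List.length_cons]; omega

theorem pvA_nil : pvA [] = [] := by simp [pvA]

theorem pvA_palin (t : List Char) (h : t.reverse = t) : pvA t = t := by
  cases t with
  | nil => exact pvA_nil
  | cons c rest => simp only [pvA, if_pos h]

theorem pvA_cons_eq (c : Char) (rest : List Char) (hnp : ¬ (c :: rest).reverse = c :: rest) :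
    pvA (c :: rest) =
      (let last := (c :: rest).getLast (by simp)
       if c = last then c :: (pvA rest.dropLast ++ [last])
       else
         let pal1 := c :: (pvA rest ++ [c])
         let pal2 := last :: (pvA (c :: rest).dropLast ++ [last])
         if pal1.length > pal2.length then pal2
         else if pal1.length < pal2.length then pal1
         else if lexLt pal1 pal2 then pal1 else pal2) := by
  simp only [pvA, if_neg hnp]

-- layer 0 is the initial row of empty strings
theorem layer_zero (l : List Char) : layer l 0 = List.replicate (l.length + 1) [] := by
  unfold layer
  rw [List.eq_replicate_iff]
  refine ⟨by simp, ?_⟩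
  intro b hb
  simp only [List.mem_map, List.mem_range] at hb
  obtain ⟨i, _, rfl⟩ := hb
  simp [pvA_nil]

-- the heart: one DP cell equals A on the corresponding substring
theorem cell_eq (l : List Char) (prev2 prev : List (List Char)) (L i : Nat)
    (hL : 1 ≤ L) (h : i + L ≤ l.length)
    (hprev : prev = layer l (L - 1)) (hprev2 : 2 ≤ L → prev2 = layer l (L - 2)) :
    pvBcell l prev2 prev L i = pvA ((l.drop i).take L) := by
  have htl := sub_len l L i h
  simp only [pvBcell]
  by_cases hp : ((l.drop i).take L).reverse = (l.drop i).take L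
  · simp [hp, pvA_palin _ hp]
  · have hL2 : 2 ≤ L := by have := not_palin_len _ hp; omega
    have htc := sub_cons l L i hL h
    have hlast? : (l[i]'(by omega) :: (l.drop (i + 1)).take (L - 1)).getLast? =
        some (l[i + L - 1]'(by omega)) := by
      rw [← htc, List.getLast?_eq_getElem?, htl, List.getElem?_eq_getElem (by omega)]
      rw [List.getElem_take, List.getElem_drop]
      congr 2
      omega
    have hlast : ∀ (hne : (l[i]'(by omega) :: (l.drop (i + 1)).take (L - 1)) ≠ []),
        (l[i]'(by omega) :: (l.drop (i + 1)).take (L - 1)).getLast hne =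
          l[i + L - 1]'(by omega) := by
      intro hne
      have h2 : (l[i]'(by omega) :: (l.drop (i + 1)).take (L - 1)).getLast? =
          some ((l[i]'(by omega) :: (l.drop (i + 1)).take (L - 1)).getLast hne) :=
        List.getLast?_eq_getLast (h := hne)
      rw [hlast?] at h2
      exact (Option.some_injective _ h2).symm
    have hci : l.getD i ' ' = l[i]'(by omega) := List.getD_eq_getElem l ' ' (by omega)
    have hcj : l.getD (i + L - 1) ' ' = l[i + L - 1]'(by omega) :=
      List.getD_eq_getElem l ' ' (by omega)
    have hRdl : ((l.drop (i + 1)).take (L - 1)).dropLast = (l.drop (i + 1)).take (L - 2) := by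
      have he : L - 1 - 1 = L - 2 := by omega
      rw [sub_dropLast l (L - 1) (i + 1) (by omega), he]
    have hTdl : (l[i]'(by omega) :: (l.drop (i + 1)).take (L - 1)).dropLast =
        (l.drop i).take (L - 1) := by
      rw [← htc, sub_dropLast l L i h]
    have hP2 : prev2.getD (i + 1) [] = pvA ((l.drop (i + 1)).take (L - 2)) := by
      rw [hprev2 hL2, layer_getD l (L - 2) (i + 1) (by omega)]
    have hP1a : prev.getD (i + 1) [] = pvA ((l.drop (i + 1)).take (L - 1)) := by
      rw [hprev, layer_getD l (L - 1) (i + 1) (by omega)]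
    have hP1b : prev.getD i [] = pvA ((l.drop i).take (L - 1)) := by
      rw [hprev, layer_getD l (L - 1) i (by omega)]
    rw [htc] at hp ⊢
    rw [pvA_cons_eq _ _ hp]
    simp only [if_neg hp, hci, hcj, hlast, hP2, hP1a, hP1b, hRdl, hTdl]
    by_cases hcc : l[i]'(by omega) = l[i + L - 1]'(by omega)
    · simp [hcc]
    · simp only [if_neg hcc]
      set p1 := l[i]'(by omega) :: (pvA ((l.drop (i + 1)).take (L - 1)) ++ [l[i]'(by omega)])
        with hd1
      set p2 := l[i + L - 1]'(by omega) ::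
        (pvA ((l.drop i).take (L - 1)) ++ [l[i + L - 1]'(by omega)]) with hd2
      rcases Nat.lt_trichotomy p1.length p2.length with hlt | heq | hgt
      · simp [hlt, Nat.not_lt.mpr (Nat.le_of_lt hlt)]
      · simp only [heq, lt_irrefl, if_false]
        cases hx : lexLt p1 p2
        · cases hy : lexLt p2 p1
          · simp [lexLt_eq_of_not p1 p2 hx hy]
          · simp
        · have hy := lexLt_asymm p1 p2 hx
          simp [hy]
      · simp [hgt, Nat.not_lt.mpr (Nat.le_of_lt hgt)]

-- loop invariant: after processing lengths 1..m the state holds layers m-1 and m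
theorem fold_inv (l : List Char) (m : Nat) (hm : m ≤ l.length) :
    (List.range m).foldl (fun st Lm1 => pvBstep l l.length st (Lm1 + 1))
      (([] : List (List Char)), List.replicate (l.length + 1) ([] : List Char)) =
    ((if m = 0 then [] else layer l (m - 1)), layer l m) := by
  induction m with
  | zero => simp [layer_zero]
  | succ k ih =>
    rw [List.range_succ, List.foldl_append, ih (by omega)]
    simp only [List.foldl_cons, List.foldl_nil, pvBstep]
    refine Prod.ext ?_ ?_
    · simp
    · show (List.range (l.length - (k + 1) + 1)).map _ = layer l (k + 1)
      have hlay : layer l (k + 1) =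
          (List.range (l.length - (k + 1) + 1)).map (fun i => pvA ((l.drop i).take (k + 1))) := rfl
      rw [hlay]
      refine List.map_congr_left ?_
      intro i hi
      rw [List.mem_range] at hi
      refine cell_eq l _ _ (k + 1) i (by omega) (by omega) rfl ?_
      intro h2
      have hk : ¬ (k = 0) := by omega
      have he : k + 1 - 2 = k - 1 := by omega
      simp only [hk, if_false, he]

theorem pvB_eq_pvA (l : List Char) : pvB l = pvA l := by
  have h0 : (layer l l.length).getD 0 [] = pvA ((l.drop 0).take l.length) :=
    layer_getD l l.length 0 (by omega)
  simp only [pvB]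
  rw [fold_inv l l.length le_rfl]
  simpa using h0

-- ===== VERDICT (by name: the statement is the Claim_ definition above) =====
theorem get_palindrome_spec : Claim_equal_get_palindrome := by
  intro s _
  unfold Spec_get_palindrome get_palindrome get_palindrome_alt
  rw [pvB_eq_pvA]
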